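-- pv_equiv track=rewrite | github.com/Adamhat/OSUSpring2023 | cs325/HW4/solutions/datastream.py | ksmallest2
-- ===== SOURCE A (Python) =====
-- import heapq
--
-- def ksmallest2(k, l): # a bit faster than the above
--     if k == 0: return []
--     l = iter(l) # iterator, so you can call next()
--     heap = []
--     for _ in range(k): # k << n, so no need to try ... except
--         heap.append(-next(l))
--     heapq.heapify(heap)
--     for x in l:
--         if -x > heap[0]:
--             heapq.heapreplace(heap, -x)
--     return sorted([-x for x in heap])
-- ===== SOURCE B (Python) =====
-- def _insort(buf, x):
--     """Insert x into the sorted list buf, after any equal elements (binary search, in place)."""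
--     lo, hi = 0, len(buf)
--     while lo < hi:
--         mid = (lo + hi) // 2
--         if buf[mid] <= x:
--             lo = mid + 1
--         else:
--             hi = mid
--     buf.insert(lo, x)
--
--
-- def ksmallest2(k, l):
--     if k == 0:
--         return []
--     it = iter(l)
--     buf = []           # kept sorted ascending at all times
--     for _ in range(k):
--         _insort(buf, next(it))
--     for x in it:
--         if x < buf[-1]:       # strictly smaller than current k-th smallest
--             buf.pop()
--             _insort(buf, x)
--     return buf                # already sorted, no final sort
-- ===== Notes on version B (the rewrite author's own statement) =====
-- stated objective: alternative
-- what changed: Replaces the max-heap of negated values (heapify/heapreplace plus a final sort) by a size-k buffer kept sorted ascending via a hand-written bisect_right insertion, evicting the largest element on a strictly smaller incoming value and returning the buffer directly with no final sort or negation.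
import Mathlib
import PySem

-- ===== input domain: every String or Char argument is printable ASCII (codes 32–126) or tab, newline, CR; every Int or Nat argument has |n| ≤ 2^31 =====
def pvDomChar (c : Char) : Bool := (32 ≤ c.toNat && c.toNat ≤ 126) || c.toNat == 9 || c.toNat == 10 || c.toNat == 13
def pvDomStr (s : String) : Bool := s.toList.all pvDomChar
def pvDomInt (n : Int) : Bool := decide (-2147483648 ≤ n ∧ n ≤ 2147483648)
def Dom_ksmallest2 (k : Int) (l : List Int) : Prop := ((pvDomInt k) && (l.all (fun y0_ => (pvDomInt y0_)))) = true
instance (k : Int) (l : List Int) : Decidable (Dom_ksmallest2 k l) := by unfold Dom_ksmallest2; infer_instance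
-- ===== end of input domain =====

-- B replaces A's max-heap of negated values (heapify/heapreplace + final sort) by a size-k
-- ascending sorted buffer maintained by ordered insertion and returned without a final sort;
-- same cost class, genuinely different data structure (objective: alternative).


-- ===== PORT A =====
-- heapq is modelled by its observable contract in this program: heapify/heapreplace keep the
-- multiset of elements and keep a minimum at index 0; only heap[0] and the final multiset are
-- ever observed by A (the return value re-sorts the contents), so this is exact here.
def pvHeapify (h : List Int) : List Int :=
  match PySem.List.min? h (fun y => y) with
  | none => h
  | some m => m :: h.erase m

-- heapq.heapreplace(heap, item): pop the root, push item (contents = tail + [item], root = min)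
def pvHeapreplace (h : List Int) (item : Int) : List Int :=
  pvHeapify (item :: h.tail)

-- 'for _ in range(k): heap.append(-next(l))' consumes the first k stream elements (it raises
-- StopIteration when len(l) < k — excluded by Pre_); 'heap[0]' is ported as headD 0, the heap
-- being nonempty on every input admitted by Pre_ that reaches the second loop.
def ksmallest2 (k : Int) (l : List Int) : List Int :=
  if k = 0 then []
  else
    let heap := (l.take k.toNat).foldl (fun h v => h ++ [-v]) []
    let heap := pvHeapify heap
    let heap := (l.drop k.toNat).foldl
      (fun h x => if -x > h.headD 0 then pvHeapreplace h (-x) else h) heap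
    PySem.List.sorted (heap.map (fun x => -x)) (fun y => y)

-- ===== PORT B =====
-- _insort(buf, x): the binary-search loop is exactly bisect.bisect_right (= PySem.List.bisectRight,
-- the same lo/hi/mid loop); buf.insert(lo, x) is PySem.List.insert; Source B mutates buf, the port
-- returns the new list (only the return value is claimed)
def pvInsort (buf : List Int) (x : Int) : List Int :=
  PySem.List.insert buf ((PySem.List.bisectRight buf x : Nat) : Int) x

-- 'buf[-1]' is ported as getLastD 0: buf is nonempty whenever the second loop runs under Pre_
def ksmallest2_alt (k : Int) (l : List Int) : List Int :=
  if k = 0 then []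
  else
    let buf := (l.take k.toNat).foldl (fun b x => pvInsort b x) []
    (l.drop k.toNat).foldl
      (fun b x => if x < b.getLastD 0 then pvInsort b.dropLast x else b) buf

-- ===== PRECONDITION & SPEC =====
-- Pre_ excludes exactly the inputs on which A raises: k > len(l) with k ≥ 0 (StopIteration on
-- next), and k < 0 with l nonempty (IndexError on heap[0]); A returns on everything admitted.
def Pre_ksmallest2 (k : Int) (l : List Int) : Prop :=
  (0 ≤ k ∧ k ≤ l.length) ∨ (k < 0 ∧ l = [])
instance (k : Int) (l : List Int) : Decidable (Pre_ksmallest2 k l) := by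
  unfold Pre_ksmallest2; infer_instance

def pvWitness_ksmallest2 : Int × List Int := (2, [3, 1, 2])

def Spec_ksmallest2 (k : Int) (l : List Int) (out : List Int) : Prop := out = ksmallest2_alt k l
instance (k : Int) (l : List Int) (out : List Int) : Decidable (Spec_ksmallest2 k l out) := by
  unfold Spec_ksmallest2; infer_instance

-- ===== CLAIM (what is proved, stated in full; the proofs are below) =====
def Claim_equal_ksmallest2 : Prop := ∀ (k : Int) (l : List Int), Dom_ksmallest2 k l → Pre_ksmallest2 k l → Spec_ksmallest2 k l (ksmallest2 k l)

-- ===== LEMMAS AND PROOFS =====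

-- linear characterisation of ordered insertion: index = length of the leading run of elements ≤ x
def pvInsortIdx (buf : List Int) (x : Int) : Nat :=
  match buf with
  | [] => 0
  | y :: ys => if y ≤ x then pvInsortIdx ys x + 1 else 0

def pvInsortLin (buf : List Int) (x : Int) : List Int :=
  buf.take (pvInsortIdx buf x) ++ [x] ++ buf.drop (pvInsortIdx buf x)

theorem pvInsortIdx_le (buf : List Int) (x : Int) : pvInsortIdx buf x ≤ buf.length := by
  induction buf with
  | nil => simp [pvInsortIdx]
  | cons y ys ih =>
    by_cases h : y ≤ x
    · simp [pvInsortIdx, h]; omega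
    · simp [pvInsortIdx, h]

theorem pvInsortIdx_before (buf : List Int) (x : Int) :
    ∀ j (hj : j < buf.length), j < pvInsortIdx buf x → buf[j] ≤ x := by
  induction buf with
  | nil => simp
  | cons y ys ih =>
    intro j hj hlt
    by_cases h : y ≤ x
    · cases j with
      | zero => simpa using h
      | succ i =>
        simp only [pvInsortIdx, h, if_true] at hlt
        simpa using ih i (by simpa using hj) (by omega)
    · simp [pvInsortIdx, h] at hlt

theorem pvInsortIdx_after (buf : List Int) (x : Int)
    (h : pvInsortIdx buf x < buf.length) : x < buf[pvInsortIdx buf x] := by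
  induction buf with
  | nil => simp [pvInsortIdx] at h
  | cons y ys ih =>
    by_cases hy : y ≤ x
    · simp only [pvInsortIdx, hy, if_true] at h ⊢
      simpa using ih (by simpa using h)
    · simp [pvInsortIdx, hy] at h ⊢
      omega

theorem pvBisect_eq_idx (buf : List Int) (x : Int) (hb : buf.Pairwise (· ≤ ·)) :
    PySem.List.bisectRight buf x = pvInsortIdx buf x := by
  obtain ⟨h1, h2, h3⟩ := PySem.List.bisectRight_spec buf x hb
  rcases lt_trichotomy (PySem.List.bisectRight buf x) (pvInsortIdx buf x) with hlt | heq | hgt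
  · have hlen : PySem.List.bisectRight buf x < buf.length :=
      lt_of_lt_of_le hlt (pvInsortIdx_le buf x)
    have ha := h3 _ hlen (le_refl _)
    have hc := pvInsortIdx_before buf x _ hlen hlt
    omega
  · exact heq
  · have hlen : pvInsortIdx buf x < buf.length := lt_of_lt_of_le hgt h1
    have ha := pvInsortIdx_after buf x hlen
    have hc := h2 _ hlen hgt
    omega

theorem pvInsort_eq_lin (buf : List Int) (x : Int) (hb : buf.Pairwise (· ≤ ·)) :
    pvInsort buf x = pvInsortLin buf x := by
  unfold pvInsort pvInsortLin
  rw [pvBisect_eq_idx buf x hb,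
    PySem.List.insert_natCast buf (pvInsortIdx buf x) x (pvInsortIdx_le buf x)]
  simp

theorem pvInsortLin_cons (y : Int) (ys : List Int) (x : Int) :
    pvInsortLin (y :: ys) x = if y ≤ x then y :: pvInsortLin ys x else x :: y :: ys := by
  by_cases h : y ≤ x <;> simp [pvInsortLin, pvInsortIdx, h]

theorem pvInsortLin_perm (b : List Int) (x : Int) : (pvInsortLin b x).Perm (x :: b) := by
  induction b with
  | nil => simp [pvInsortLin, pvInsortIdx]
  | cons y ys ih =>
    rw [pvInsortLin_cons]
    by_cases h : y ≤ x
    · simpa [h] using (ih.cons y).trans (List.Perm.swap x y ys)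
    · simp [h]

theorem pvInsortLin_pairwise (b : List Int) (x : Int) (hb : b.Pairwise (· ≤ ·)) :
    (pvInsortLin b x).Pairwise (· ≤ ·) := by
  induction b with
  | nil => simp [pvInsortLin, pvInsortIdx]
  | cons y ys ih =>
    rw [pvInsortLin_cons]
    rcases List.pairwise_cons.mp hb with ⟨hy, hys⟩
    by_cases h : y ≤ x
    · simp only [h, if_true]
      refine List.pairwise_cons.mpr ⟨?_, ih hys⟩
      intro z hz
      have hz' : z = x ∨ z ∈ ys := by simpa using (pvInsortLin_perm ys x).mem_iff.mp hz
      rcases hz' with rfl | hzys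
      · exact h
      · exact hy z hzys
    · simp only [h, if_false]
      refine List.pairwise_cons.mpr ⟨?_, hb⟩
      intro z hz
      rcases List.mem_cons.mp hz with rfl | hzys
      · exact le_of_lt (lt_of_not_ge h)
      · exact le_trans (le_of_lt (lt_of_not_ge h)) (hy z hzys)

theorem pvInsortLin_ne_nil (b : List Int) (x : Int) : pvInsortLin b x ≠ [] := by
  intro hnil
  have := (pvInsortLin_perm b x).length_eq
  simp [hnil] at this

-- pvHeapify preserves contents
theorem pvHeapify_perm (h : List Int) : (pvHeapify h).Perm h := by
  unfold pvHeapify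
  cases hm : PySem.List.min? h (fun y => y) with
  | none => exact List.Perm.refl h
  | some m => exact (List.perm_cons_erase (PySem.List.min?_mem hm)).symm

def pvRootMin (h : List Int) : Prop := ∀ y ∈ h, h.headD 0 ≤ y

theorem pvHeapify_rootMin (h : List Int) (hne : h ≠ []) : pvRootMin (pvHeapify h) := by
  cases hm : PySem.List.min? h (fun y => y) with
  | none =>
    exact absurd ((PySem.List.min?_eq_none_iff h (fun y => y)).mp hm) hne
  | some m =>
    intro y hy
    unfold pvHeapify at hy ⊢
    rw [hm] at hy ⊢
    have hmem : y ∈ h := (pvHeapify_perm h).subset (by unfold pvHeapify; rw [hm]; exact hy)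
    simpa using PySem.List.min?_isMin hm y hmem

-- last element of a sorted nonempty list is maximal and a member
theorem getLastD_mem (b : List Int) (hb : b ≠ []) : b.getLastD 0 ∈ b := by
  induction b with
  | nil => exact absurd rfl hb
  | cons y ys ih =>
    cases ys with
    | nil => simp
    | cons z zs => simpa using Or.inr (ih (by simp))

theorem getLastD_max (b : List Int) (hb : b.Pairwise (· ≤ ·)) :
    ∀ y ∈ b, y ≤ b.getLastD 0 := by
  induction b with
  | nil => simp
  | cons y ys ih =>
    rcases List.pairwise_cons.mp hb with ⟨hy, hys⟩
    intro z hz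
    cases ys with
    | nil => simp at hz ⊢; omega
    | cons w ws =>
      rcases List.mem_cons.mp hz with rfl | hzys
      · exact le_trans (hy w (by simp)) (by simpa using ih hys w (by simp))
      · simpa using ih hys z hzys

theorem dropLast_append_getLastD (b : List Int) (hb : b ≠ []) :
    b.dropLast ++ [b.getLastD 0] = b := by
  induction b with
  | nil => exact absurd rfl hb
  | cons y ys ih =>
    cases ys with
    | nil => simp
    | cons z zs => simpa using ih (by simp)

-- the init loop of A: appending negations is mapping negation
theorem foldl_append_neg (T : List Int) :
    ∀ init : List Int, T.foldl (fun h v => h ++ [-v]) init = init ++ T.map (fun v => -v) := by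
  induction T with
  | nil => simp
  | cons t ts ih => intro init; simp [List.foldl_cons, ih]

-- the init loop of B: repeated ordered insertion builds a sorted permutation
theorem foldl_insort (T : List Int) :
    ∀ b : List Int, b.Pairwise (· ≤ ·) →
      (T.foldl (fun b x => pvInsort b x) b).Perm (T ++ b) ∧
      (T.foldl (fun b x => pvInsort b x) b).Pairwise (· ≤ ·) := by
  induction T with
  | nil => intro b hb; exact ⟨by simp, hb⟩
  | cons t ts ih =>
    intro b hb
    simp only [List.foldl_cons, pvInsort_eq_lin b t hb]
    have h1 := ih (pvInsortLin b t) (pvInsortLin_pairwise b t hb)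
    refine ⟨?_, h1.2⟩
    have p2 : (ts ++ pvInsortLin b t).Perm (ts ++ (t :: b)) :=
      List.Perm.append_left ts (pvInsortLin_perm b t)
    have p3 : (ts ++ (t :: b)).Perm (t :: (ts ++ b)) := List.perm_middle
    exact (h1.1.trans (p2.trans p3))

-- the main loop invariant: heap contents = negated buffer contents; buffer sorted nonempty;
-- heap root minimal
theorem pvLoopInv (rest : List Int) :
    ∀ (heap buf : List Int),
      heap.Perm (buf.map (fun v => -v)) → buf.Pairwise (· ≤ ·) → buf ≠ [] → pvRootMin heap →
      (rest.foldl (fun h x => if -x > h.headD 0 then pvHeapreplace h (-x) else h) heap).Perm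
        ((rest.foldl (fun b x => if x < b.getLastD 0 then pvInsort b.dropLast x else b) buf).map
          (fun v => -v)) ∧
      (rest.foldl (fun b x => if x < b.getLastD 0 then pvInsort b.dropLast x else b) buf).Pairwise (· ≤ ·) ∧
      (rest.foldl (fun b x => if x < b.getLastD 0 then pvInsort b.dropLast x else b) buf) ≠ [] := by
  induction rest with
  | nil => intro heap buf hperm hsort hne _; exact ⟨hperm, hsort, hne⟩
  | cons x rest ih =>
    intro heap buf hperm hsort hne hroot
    have hheapne : heap ≠ [] := by
      intro h0
      rw [h0] at hperm
      have := hperm.symm.eq_nil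
      simp only [List.map_eq_nil_iff] at this
      exact hne this
    -- heap.headD 0 = -(buf.getLastD 0)
    have hmemh : heap.headD 0 ∈ heap := by
      cases heap with | nil => exact absurd rfl hheapne | cons a t => simp
    have hL : buf.getLastD 0 ∈ buf := getLastD_mem buf hne
    have hLneg : -(buf.getLastD 0) ∈ heap := hperm.mem_iff.mpr (List.mem_map.mpr ⟨_, hL, rfl⟩)
    have h1 : heap.headD 0 ≤ -(buf.getLastD 0) := hroot _ hLneg
    have h2 : -(buf.getLastD 0) ≤ heap.headD 0 := by
      rcases List.mem_map.mp (hperm.mem_iff.mp hmemh) with ⟨b, hb, hbe⟩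
      have := getLastD_max buf hsort b hb
      omega
    have hhead : heap.headD 0 = -(buf.getLastD 0) := le_antisymm h1 h2
    have hcond : (-x > heap.headD 0) = (x < buf.getLastD 0) := by
      rw [hhead]; simp only [gt_iff_lt]
      by_cases hc : x < buf.getLastD 0
      · simp only [hc, eq_iff_iff, iff_true]; omega
      · simp only [hc, eq_iff_iff, iff_false]; omega
    simp only [List.foldl_cons, hcond]
    by_cases hc : x < buf.getLastD 0
    · simp only [hc, if_true]
      -- replaced step
      have hdropsort : buf.dropLast.Pairwise (· ≤ ·) :=
        hsort.sublist (List.dropLast_sublist buf)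
      rw [pvInsort_eq_lin buf.dropLast x hdropsort]
      obtain ⟨a, t, ha⟩ : ∃ a t, heap = a :: t := by
        cases heap with | nil => exact absurd rfl hheapne | cons a t => exact ⟨a, t, rfl⟩
      have htail : t.Perm (buf.dropLast.map (fun v => -v)) := by
        have hb : buf.dropLast ++ [buf.getLastD 0] = buf := dropLast_append_getLastD buf hne
        have h5 : (buf.map (fun v => -v)).Perm
            ((buf.getLastD 0 :: buf.dropLast).map (fun v => -v)) := by
          have e1 : buf.map (fun v => -v)
              = buf.dropLast.map (fun v => -v) ++ [-(buf.getLastD 0)] := by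
            conv_lhs => rw [← hb]
            simp
          rw [e1]
          exact List.perm_append_singleton (-(buf.getLastD 0)) (buf.dropLast.map (fun v => -v))
        have h6 : (a :: t).Perm ((buf.getLastD 0 :: buf.dropLast).map (fun v => -v)) :=
          (ha ▸ hperm).trans h5
        have ha' : a = heap.headD 0 := by rw [ha]; simp
        rw [ha', hhead] at h6
        simpa using h6.cons_inv
      have hnewperm : (pvHeapreplace heap (-x)).Perm
          ((pvInsortLin buf.dropLast x).map (fun v => -v)) := by
        unfold pvHeapreplace
        have h3 : (-x :: heap.tail).Perm (-x :: buf.dropLast.map (fun v => -v)) := by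
          rw [ha]; exact (htail).cons _
        have h4 : ((pvInsortLin buf.dropLast x).map (fun v => -v)).Perm
            (-x :: buf.dropLast.map (fun v => -v)) := by
          simpa using (pvInsortLin_perm buf.dropLast x).map (fun v => -v)
        exact ((pvHeapify_perm _).trans h3).trans h4.symm
      have hnewsort := pvInsortLin_pairwise buf.dropLast x hdropsort
      have hnewne := pvInsortLin_ne_nil buf.dropLast x
      have hnewroot : pvRootMin (pvHeapreplace heap (-x)) := by
        unfold pvHeapreplace
        exact pvHeapify_rootMin _ (by simp)
      exact ih _ _ hnewperm hnewsort hnewne hnewroot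
    · simp only [hc, if_false]
      exact ih _ _ hperm hsort hne hroot

-- ===== VERDICT (by name: the statement is the Claim_ definition above) =====
theorem ksmallest2_spec : Claim_equal_ksmallest2 := by
  intro k l _ hpre
  unfold Spec_ksmallest2
  by_cases hk : k = 0
  · simp [ksmallest2, ksmallest2_alt, hk]
  rcases hpre with ⟨hk0, hkl⟩ | ⟨hkneg, hlnil⟩
  · -- 0 < k ≤ len l
    have hkpos : 0 < k := lt_of_le_of_ne hk0 (Ne.symm hk)
    have hTne : l.take k.toNat ≠ [] := by
      intro h0
      have hlen := congrArg List.length h0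
      rw [List.length_take] at hlen
      simp only [List.length_nil] at hlen
      omega
    unfold ksmallest2 ksmallest2_alt
    simp only [hk, if_false]
    rw [foldl_append_neg (l.take k.toNat) [], List.nil_append]
    obtain ⟨hbperm, hbsort⟩ := foldl_insort (l.take k.toNat) [] List.Pairwise.nil
    rw [List.append_nil] at hbperm
    have hbne : (l.take k.toNat).foldl (fun b x => pvInsort b x) [] ≠ [] := by
      intro h0; rw [h0] at hbperm
      exact hTne hbperm.symm.eq_nil
    have hperm0 : (pvHeapify ((l.take k.toNat).map (fun v => -v))).Perm
        (((l.take k.toNat).foldl (fun b x => pvInsort b x) []).map (fun v => -v)) :=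
      (pvHeapify_perm _).trans (hbperm.map (fun v => -v)).symm
    have hroot0 : pvRootMin (pvHeapify ((l.take k.toNat).map (fun v => -v))) :=
      pvHeapify_rootMin _ (by simpa using hTne)
    obtain ⟨hfp, hfs, _⟩ := pvLoopInv (l.drop k.toNat) _ _ hperm0 hbsort hbne hroot0
    -- final: sorted of the heap contents is exactly the buffer
    refine PySem.List.sorted_id_eq_of_perm_of_pairwise _ _ ?_ hfs
    have := hfp.map (fun v => -v)
    simpa [List.map_map, Function.comp] using this.symm
  · -- k < 0 and l = []
    subst hlnil
    simp [ksmallest2, ksmallest2_alt, hk, pvHeapify, PySem.List.min?, PySem.List.sorted]
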